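-- pv_equiv track=rewrite | github.com/howardyun/LLM_invisiable_benchmark | Evaluation/evaluate_injection_recovery.py | ordered_match_count
-- ===== SOURCE A (Python) =====
-- def ordered_match_count(reference_tokens: list[str], candidate_tokens: list[str]) -> int:
--     if not reference_tokens or not candidate_tokens:
--         return 0
--
--     candidate_index = 0
--     matched = 0
--     candidate_len = len(candidate_tokens)
--
--     for token in reference_tokens:
--         while candidate_index < candidate_len and candidate_tokens[candidate_index] != token:
--             candidate_index += 1
--         if candidate_index >= candidate_len:
--             break
--         matched += 1
--         candidate_index += 1
--
--     return matched
-- ===== SOURCE B (Python) =====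
-- def _first_greater(positions, x):
--     """Index of the first element of the ascending list `positions` that is > x
--     (hand-written bisect_right, since no imports are available)."""
--     lo, hi = 0, len(positions)
--     while lo < hi:
--         mid = (lo + hi) // 2
--         if positions[mid] <= x:
--             lo = mid + 1
--         else:
--             hi = mid
--     return lo
--
--
-- def ordered_match_count(reference_tokens: list[str], candidate_tokens: list[str]) -> int:
--     # Index the candidate once: token -> ascending list of its positions.
--     positions = {}
--     for i, tok in enumerate(candidate_tokens):
--         positions.setdefault(tok, []).append(i)
--
--     pos = -1  # index of the previous match in candidate_tokens
--     matched = 0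
--     for tok in reference_tokens:
--         lst = positions.get(tok, [])
--         j = _first_greater(lst, pos)
--         if j == len(lst):
--             break
--         matched += 1
--         pos = lst[j]
--     return matched
-- ===== Notes on version B (the rewrite author's own statement) =====
-- stated objective: alternative
-- what changed: Replaces A's single advancing candidate-index scan with a precomputed token->sorted-positions dictionary plus a hand-written binary search (bisect_right) per reference token to find the first occurrence strictly after the previous match.
import Mathlib
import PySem

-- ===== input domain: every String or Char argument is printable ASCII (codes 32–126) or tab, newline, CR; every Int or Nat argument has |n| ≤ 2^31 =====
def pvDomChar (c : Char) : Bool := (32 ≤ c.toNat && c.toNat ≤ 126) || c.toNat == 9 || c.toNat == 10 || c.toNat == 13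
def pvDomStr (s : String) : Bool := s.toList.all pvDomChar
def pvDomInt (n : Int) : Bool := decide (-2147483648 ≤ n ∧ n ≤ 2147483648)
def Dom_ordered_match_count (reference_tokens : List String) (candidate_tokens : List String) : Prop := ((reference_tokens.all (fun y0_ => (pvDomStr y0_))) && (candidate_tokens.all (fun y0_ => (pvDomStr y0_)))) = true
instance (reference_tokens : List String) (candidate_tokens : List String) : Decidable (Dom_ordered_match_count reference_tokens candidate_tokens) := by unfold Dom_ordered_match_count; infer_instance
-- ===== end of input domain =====

-- B replaces A's single advancing scan pointer with a token → positions index built once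
-- plus a hand-written binary search (bisect_right) per reference token; objective: alternative
-- (a different data structure and traversal, similar cost).

-- ===== PORT A =====
-- inner `while candidate_index < candidate_len and candidate_tokens[candidate_index] != token`
-- (the `ci < length` guard makes getD exact: Python only indexes in range here)
def ordered_match_count.awhile (cand : List String) (tok : String) (ci : Nat) : Nat :=
  if _h : ci < cand.length ∧ cand.getD ci "" ≠ tok then
    ordered_match_count.awhile cand tok (ci + 1)
  else ci
termination_by cand.length - ci
decreasing_by omega

-- outer `for token in reference_tokens` with state (candidate_index, matched); `break` returns matched
def ordered_match_count.aloop (cand : List String) (refs : List String) (ci : Nat) (matched : Int) : Int :=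
  match refs with
  | [] => matched
  | tok :: rest =>
      let ci' := ordered_match_count.awhile cand tok ci
      if ci' ≥ cand.length then matched
      else ordered_match_count.aloop cand rest (ci' + 1) (matched + 1)

def ordered_match_count (reference_tokens : List String) (candidate_tokens : List String) : Int :=
  if reference_tokens.isEmpty || candidate_tokens.isEmpty then 0
  else ordered_match_count.aloop candidate_tokens reference_tokens 0 0

-- ===== PORT B =====
-- hand-written bisect_right of Source B: first index in the ascending list with element > x
-- (`positions[mid]` is exact via getD: the loop keeps mid < hi ≤ len)
def ordered_match_count_alt.firstGreater (lst : List Int) (x : Int) (lo hi : Nat) : Nat :=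
  if _h : lo < hi then
    let mid := (lo + hi) / 2
    if lst.getD mid 0 ≤ x then ordered_match_count_alt.firstGreater lst x (mid + 1) hi
    else ordered_match_count_alt.firstGreater lst x lo mid
  else lo
termination_by hi - lo
decreasing_by all_goals omega

-- `for i, tok in enumerate(candidate_tokens): positions.setdefault(tok, []).append(i)`
def ordered_match_count_alt.buildPositions (cand : List String) : PySem.Dict String (List Int) :=
  (PySem.List.enumerate cand 0).foldl (fun d p => d.modify p.2 [] (· ++ [p.1])) PySem.Dict.empty

-- `for tok in reference_tokens` with state (pos, matched); `break` returns matched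
def ordered_match_count_alt.bloop (positions : PySem.Dict String (List Int))
    (refs : List String) (pos : Int) (matched : Int) : Int :=
  match refs with
  | [] => matched
  | tok :: rest =>
      let lst := positions.getD tok []
      let j := ordered_match_count_alt.firstGreater lst pos 0 lst.length
      if j = lst.length then matched
      else ordered_match_count_alt.bloop positions rest (lst.getD j 0) (matched + 1)

def ordered_match_count_alt (reference_tokens : List String) (candidate_tokens : List String) : Int :=
  ordered_match_count_alt.bloop (ordered_match_count_alt.buildPositions candidate_tokens)
    reference_tokens (-1) 0

-- ===== PRECONDITION & SPEC =====
def Spec_ordered_match_count (reference_tokens : List String) (candidate_tokens : List String) (out : Int) : Prop := out = ordered_match_count_alt reference_tokens candidate_tokens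
instance (reference_tokens : List String) (candidate_tokens : List String) (out : Int) : Decidable (Spec_ordered_match_count reference_tokens candidate_tokens out) := by unfold Spec_ordered_match_count; infer_instance

-- ===== CLAIM (what is proved, stated in full; the proofs are below) =====
def Claim_equal_ordered_match_count : Prop := ∀ (reference_tokens : List String) (candidate_tokens : List String), Dom_ordered_match_count reference_tokens candidate_tokens → Spec_ordered_match_count reference_tokens candidate_tokens (ordered_match_count reference_tokens candidate_tokens)

-- ===== LEMMAS AND PROOFS =====

-- the positions stored for a token: indices of its occurrences in candidate order
def pvIdxs (cand : List String) (tok : String) : List Int :=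
  ((PySem.List.enumerate cand 0).filter (fun p => p.2 == tok)).map (·.1)

theorem pvBuild_getD (cand : List String) (tok : String) :
    (ordered_match_count_alt.buildPositions cand).getD tok [] = pvIdxs cand tok := by
  unfold ordered_match_count_alt.buildPositions pvIdxs
  have hfold : (PySem.List.enumerate cand).foldl
      (fun (d : PySem.Dict String (List Int)) (p : Int × String) => d.modify p.2 [] (· ++ [p.1]))
      PySem.Dict.empty
      = ((PySem.List.enumerate cand).map (fun p => (p.2, p.1))).foldl
        (fun (d : PySem.Dict String (List Int)) (q : String × Int) => d.modify q.1 [] (· ++ [q.2]))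
        PySem.Dict.empty := by
    rw [List.foldl_map]
  rw [hfold, PySem.Dict.getD_foldl_modify_append, List.filter_map, List.map_map]
  simp [Function.comp_def]

theorem pvIdxs_sorted (cand : List String) (tok : String) :
    (pvIdxs cand tok).Pairwise (· < ·) := by
  unfold pvIdxs
  rw [List.pairwise_map]
  exact (PySem.List.pairwise_lt_enumerate cand 0).filter _

theorem pvIdxs_mem (cand : List String) (tok : String) (v : Int) :
    v ∈ pvIdxs cand tok ↔ ∃ (k : Nat) (_ : k < cand.length), v = (k : Int) ∧ cand[k] = tok := by
  unfold pvIdxs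
  simp only [List.mem_map, List.mem_filter, PySem.List.mem_enumerate_iff]
  constructor
  · rintro ⟨⟨a, b⟩, ⟨⟨k, hk, hp⟩, hb⟩, rfl⟩
    cases hp
    refine ⟨k, hk, by simp, ?_⟩
    simpa using hb
  · rintro ⟨k, hk, rfl, htok⟩
    exact ⟨((k : Int), cand[k]), ⟨⟨k, hk, by simp⟩, by simpa using htok⟩, by simp⟩

-- specification of A's inner while loop
theorem pvAwhile_spec (cand : List String) (tok : String) (ci : Nat) (h : ci ≤ cand.length) :
    ci ≤ ordered_match_count.awhile cand tok ci ∧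
    ordered_match_count.awhile cand tok ci ≤ cand.length ∧
    (∀ k, ci ≤ k → k < ordered_match_count.awhile cand tok ci → cand.getD k "" ≠ tok) ∧
    (ordered_match_count.awhile cand tok ci < cand.length →
      cand.getD (ordered_match_count.awhile cand tok ci) "" = tok) := by
  fun_induction ordered_match_count.awhile cand tok ci with
  | case1 ci hcond ih =>
      obtain ⟨h1, h2, h3, h4⟩ := ih (by omega)
      refine ⟨by omega, h2, ?_, h4⟩
      intro k hk1 hk2
      rcases Nat.eq_or_lt_of_le hk1 with rfl | hlt
      · exact hcond.2
      · exact h3 k hlt hk2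
  | case2 ci hcond =>
      refine ⟨le_refl _, ?_, by omega, ?_⟩
      · by_cases hlen : ci < cand.length
        · omega
        · omega
      · intro hlt
        by_contra hne
        exact hcond ⟨hlt, hne⟩

-- specification of B's binary search (on a strictly ascending list)
theorem pvFG_spec (lst : List Int) (x : Int) (lo hi : Nat) (hlohi : lo ≤ hi)
    (hhi : hi ≤ lst.length)
    (hlo : ∀ k, k < lo → lst.getD k 0 ≤ x)
    (hhiP : ∀ k, hi ≤ k → k < lst.length → x < lst.getD k 0)
    (hs : lst.Pairwise (· < ·)) :
    lo ≤ ordered_match_count_alt.firstGreater lst x lo hi ∧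
    ordered_match_count_alt.firstGreater lst x lo hi ≤ hi ∧
    (∀ k, k < ordered_match_count_alt.firstGreater lst x lo hi → lst.getD k 0 ≤ x) ∧
    (∀ k, ordered_match_count_alt.firstGreater lst x lo hi ≤ k → k < lst.length →
      x < lst.getD k 0) := by
  have hget : ∀ i j, i < j → j < lst.length → lst.getD i 0 < lst.getD j 0 := by
    intro i j hij hj
    rw [List.getD_eq_getElem lst 0 (by omega), List.getD_eq_getElem lst 0 hj]
    exact List.pairwise_iff_getElem.mp hs i j _ _ hij
  fun_induction ordered_match_count_alt.firstGreater lst x lo hi with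
  | case1 lo hi hcond mid hle ih =>
      have hmid : lo ≤ mid ∧ mid < hi := by constructor <;> omega
      have hlo' : ∀ k, k < mid + 1 → lst.getD k 0 ≤ x := by
        intro k hk
        rcases Nat.lt_or_ge k mid with hlt | hge
        · exact le_trans (le_of_lt (hget k mid hlt (by omega))) hle
        · have : k = mid := by omega
          subst this; exact hle
      obtain ⟨a, b, c, d⟩ := ih (by omega) hhi hlo' hhiP
      exact ⟨by omega, b, c, d⟩
  | case2 lo hi hcond mid hgt ih =>
      have hmid : lo ≤ mid ∧ mid < hi := by constructor <;> omega
      have hhiP' : ∀ k, mid ≤ k → k < lst.length → x < lst.getD k 0 := by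
        intro k hk hklen
        rcases Nat.lt_or_ge mid k with hlt | hge
        · exact lt_trans (lt_of_not_ge (fun hc => hgt hc)) (hget mid k hlt hklen)
        · have : k = mid := by omega
          subst this; exact lt_of_not_ge (fun hc => hgt hc)
      obtain ⟨a, b, c, d⟩ := ih (by omega) (by omega) hlo hhiP'
      exact ⟨a, by omega, c, d⟩
  | case3 lo hi hcond =>
      exact ⟨le_refl _, by omega, fun k hk => hlo k hk,
        fun k hk hklen => hhiP k (by omega) hklen⟩

-- the two loops agree step by step, with pos = candidate_index - 1
theorem pvLoop_eq (cand : List String) (refs : List String) (ci : Nat) (matched : Int)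
    (h : ci ≤ cand.length) :
    ordered_match_count.aloop cand refs ci matched =
      ordered_match_count_alt.bloop (ordered_match_count_alt.buildPositions cand) refs
        ((ci : Int) - 1) matched := by
  induction refs generalizing ci matched with
  | nil => rfl
  | cons tok rest ih =>
      rw [ordered_match_count.aloop, ordered_match_count_alt.bloop]
      simp only [pvBuild_getD]
      set lst := pvIdxs cand tok with hlst
      set r := ordered_match_count.awhile cand tok ci with hr
      set j := ordered_match_count_alt.firstGreater lst ((ci : Int) - 1) 0 lst.length with hj
      obtain ⟨hr1, hr2, hr3, hr4⟩ := pvAwhile_spec cand tok ci h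
      obtain ⟨_, hj2, hj3, hj4⟩ := pvFG_spec lst ((ci : Int) - 1) 0 lst.length (Nat.zero_le _) (le_refl _)
        (by omega) (by omega) (pvIdxs_sorted cand tok)
      by_cases hbr : r ≥ cand.length
      · -- A breaks: no occurrence of tok at index ≥ ci; show B breaks too (j = lst.length)
        have hnone : ∀ k, ci ≤ k → k < cand.length → cand.getD k "" ≠ tok := by
          intro k hk1 hk2; exact hr3 k hk1 (by omega)
        have hjlen : j = lst.length := by
          by_contra hne
          have hjlt : j < lst.length := by omega
          have hmem : lst.getD j 0 ∈ lst := by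
            rw [List.getD_eq_getElem lst 0 hjlt]; exact List.getElem_mem hjlt
          obtain ⟨k, hk, hveq, htok⟩ := (pvIdxs_mem cand tok _).mp hmem
          have hgt : ((ci : Int) - 1) < lst.getD j 0 := hj4 j (le_refl _) hjlt
          have hkci : ci ≤ k := by omega
          exact hnone k hkci hk (by rw [List.getD_eq_getElem cand "" hk]; exact htok)
        rw [if_pos hbr, if_pos hjlen]
      · -- A matches at r: show B's search lands exactly on r
        push Not at hbr
        have hrtok : cand[r]'hbr = tok := by
          have := hr4 hbr; rwa [List.getD_eq_getElem cand "" hbr] at this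
        have hrmem : (r : Int) ∈ lst := (pvIdxs_mem cand tok _).mpr ⟨r, hbr, rfl, hrtok⟩
        obtain ⟨k0, hk0, hk0eq⟩ := List.mem_iff_getElem.mp hrmem
        have hk0getD : lst.getD k0 0 = (r : Int) := by
          rw [List.getD_eq_getElem lst 0 hk0]; exact hk0eq
        have hjlt : j < lst.length := by
          by_contra hge
          have hk0j : k0 < j := by omega
          have := hj3 k0 hk0j
          omega
        -- lst.getD j 0 = r
        have hjv_mem : lst.getD j 0 ∈ lst := by
          rw [List.getD_eq_getElem lst 0 hjlt]; exact List.getElem_mem hjlt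
        obtain ⟨k, hk, hveq, htok⟩ := (pvIdxs_mem cand tok _).mp hjv_mem
        have hjgt : ((ci : Int) - 1) < lst.getD j 0 := hj4 j (le_refl _) hjlt
        -- k ≥ r by minimality of r among occurrences ≥ ci
        have hkr : r ≤ k := by
          by_contra hlt
          push Not at hlt
          exact hr3 k (by omega) hlt (by rw [List.getD_eq_getElem cand "" hk]; exact htok)
        -- j ≤ k0 (indices below j carry values ≤ ci-1 < r)
        have hjk0 : j ≤ k0 := by
          by_contra hlt
          have := hj3 k0 (by omega)
          omega
        have hsorted := pvIdxs_sorted cand tok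
        have hle : lst.getD j 0 ≤ lst.getD k0 0 := by
          rcases Nat.eq_or_lt_of_le hjk0 with rfl | hlt
          · exact le_refl _
          · rw [List.getD_eq_getElem lst 0 hjlt, List.getD_eq_getElem lst 0 hk0]
            exact le_of_lt (List.pairwise_iff_getElem.mp hsorted j k0 _ _ hlt)
        have hjval : lst.getD j 0 = (r : Int) := by omega
        rw [if_neg (by omega), if_neg (by omega)]
        have := ih (r + 1) (matched + 1) (by omega)
        rw [this, hjval]
        norm_num
  
theorem pvAlt_empty_cand (refs : List String) (matched : Int) :
    ordered_match_count.aloop [] refs 0 matched = matched := by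
  cases refs with
  | nil => rfl
  | cons tok rest =>
      rw [ordered_match_count.aloop]
      have : ordered_match_count.awhile [] tok 0 = 0 := by
        rw [ordered_match_count.awhile]; simp
      simp [this]

-- ===== VERDICT (by name: the statement is the Claim_ definition above) =====
theorem ordered_match_count_spec : Claim_equal_ordered_match_count := by
  intro refs cand _
  unfold Spec_ordered_match_count ordered_match_count ordered_match_count_alt
  by_cases hr : refs.isEmpty
  · rw [if_pos (by simp [hr])]
    cases refs with
    | nil => rfl
    | cons a b => simp at hr
  · by_cases hc : cand.isEmpty
    · rw [if_pos (by simp [hc])]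
      have hcnil : cand = [] := List.isEmpty_iff.mp hc
      subst hcnil
      have h2 := pvLoop_eq [] refs 0 0 (by simp)
      norm_num at h2
      rw [← h2, pvAlt_empty_cand]
    · rw [if_neg (by simp [hr, hc])]
      have h2 := pvLoop_eq cand refs 0 0 (by omega)
      norm_num at h2
      exact h2
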